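-- pv_equiv track=rewrite | github.com/Naresh-Babu/advent-of-code | MirageMaintenance.py | part_two
-- ===== SOURCE A (Python) =====
-- def part_two(input_data):
-- 	patterns = input_data
--
-- 	total = 0
--
-- 	for pattern in patterns:
-- 		form = [pattern]
-- 		stack = []
-- 		while any(value != 0 for value in form[-1]):
-- 			cur = []
-- 			for i in range(len(form[-1])-1):
-- 				cur.append(form[-1][i+1] - form[-1][i])
--
-- 			stack.append(form[-1][0])
-- 			form.append(cur)
-- 		diff = 0
--
-- 		for s in stack[::-1]:
-- 			diff = s - diff
--
-- 		total += diff
--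
-- 	return total
-- ===== SOURCE B (Python) =====
-- def part_two(input_data):
--     # Newton forward-difference closed form: backward extrapolation of each
--     # pattern is sum_j (-1)^j * C(n, j+1) * v_j, computed in one O(n) pass.
--     total = 0
--     for pattern in input_data:
--         n = len(pattern)
--         s = 0
--         sign = 1
--         c = n  # C(n, 1)
--         j = 0
--         for v in pattern:
--             s += sign * c * v
--             sign = -sign
--             c = c * (n - j - 1) // (j + 2)  # C(n, j+2)
--             j += 1
--         total += s
--     return total
-- ===== Notes on version B (the rewrite author's own statement) =====
-- stated objective: faster
-- what changed: Replaces the per-pattern difference-table construction (building all difference rows, stacking first elements, folding them back) with the Newton forward-difference closed form: one pass per pattern summing (-1)^j * C(n,j+1) * v_j with an incrementally updated binomial coefficient.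
import Mathlib
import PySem

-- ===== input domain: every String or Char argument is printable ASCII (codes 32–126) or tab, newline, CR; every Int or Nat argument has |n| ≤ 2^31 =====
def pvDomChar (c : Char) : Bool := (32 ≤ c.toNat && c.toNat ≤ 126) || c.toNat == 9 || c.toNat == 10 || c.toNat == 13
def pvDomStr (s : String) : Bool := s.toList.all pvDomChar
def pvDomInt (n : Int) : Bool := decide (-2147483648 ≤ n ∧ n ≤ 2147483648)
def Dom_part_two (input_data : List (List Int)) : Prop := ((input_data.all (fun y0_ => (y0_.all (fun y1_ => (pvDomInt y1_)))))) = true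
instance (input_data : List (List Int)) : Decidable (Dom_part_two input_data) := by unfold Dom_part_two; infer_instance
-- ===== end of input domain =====

-- B replaces A's per-pattern difference-table construction with the one-pass
-- Newton forward-difference closed form (binomial-weighted alternating sum).

-- ===== PORT A =====
-- inner for-loop of A: row of consecutive differences
def pvSubRow : List Int → List Int
  | x :: y :: rest => (y - x) :: pvSubRow (y :: rest)
  | _ => []

-- (termination helper for pvStack, cited by the port's decreasing_by)
theorem pvSubRow_length (xs : List Int) : (pvSubRow xs).length = xs.length - 1 := by
  induction xs with
  | nil => simp [pvSubRow]
  | cons x rest ih =>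
    cases rest with
    | nil => simp [pvSubRow]
    | cons y r => simp [pvSubRow] at ih ⊢; omega

-- A's while loop: first elements of successive difference rows (the 'stack')
def pvStack (row : List Int) : List Int :=
  if row.any (fun v => v != 0) then row.headD 0 :: pvStack (pvSubRow row) else []
termination_by row.length
decreasing_by
  rename_i h
  have hne : row ≠ [] := by intro hn; subst hn; simp at h
  have := pvSubRow_length row
  cases row with
  | nil => exact absurd rfl hne
  | cons a r => simp_all

def part_two (input_data : List (List Int)) : Int :=
  input_data.foldl
    (fun total pattern =>
      -- for s in stack[::-1]: diff = s - diff
      total + ((pvStack pattern).reverse.foldl (fun diff s => s - diff) 0))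
    0

-- ===== PORT B =====
def part_two_alt (input_data : List (List Int)) : Int :=
  input_data.foldl
    (fun total pattern =>
      let n : Int := pattern.length
      let st := pattern.foldl
        (fun (st : Int × Int × Int × Int) v =>
          let (s, sign, c, j) := st
          (s + sign * c * v, -sign, PySem.Int.floordiv (c * (n - j - 1)) (j + 2), j + 1))
        (0, 1, n, 0)
      total + st.1)
    0

-- ===== PRECONDITION & SPEC =====
def Spec_part_two (input_data : List (List Int)) (out : Int) : Prop := out = part_two_alt input_data
instance (input_data : List (List Int)) (out : Int) : Decidable (Spec_part_two input_data out) := by unfold Spec_part_two; infer_instance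

-- ===== CLAIM (what is proved, stated in full; the proofs are below) =====
def Claim_equal_part_two : Prop := ∀ (input_data : List (List Int)), Dom_part_two input_data → Spec_part_two input_data (part_two input_data)

-- ===== LEMMAS AND PROOFS =====

-- the closed-form alternating binomial sum, starting at index j, top-row length n
def pvG (n : Nat) : List Int → Nat → Int
  | [], _ => 0
  | v :: rest, j => (-1 : Int) ^ j * (n.choose (j + 1) : Int) * v + pvG n rest (j + 1)

-- Pascal-style telescoping identity relating a row and its difference row
theorem part_two_key (m : Nat) (rest : List Int) : ∀ (j : Nat) (x : Int),
    pvG (m + 1) (x :: rest) j + pvG m (pvSubRow (x :: rest)) j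
      = (-1 : Int) ^ j * (m.choose j : Int) * x
        + (-1 : Int) ^ (j + rest.length) * (m.choose (j + rest.length + 1) : Int)
          * ((x :: rest).getLastD 0) := by
  induction rest with
  | nil =>
    intro j x
    simp only [pvG, pvSubRow, List.length_nil, List.getLastD, Nat.add_zero]
    rw [Nat.choose_succ_succ m j]
    push_cast [Nat.succ_eq_add_one, Nat.one_add]
    simp [List.getLast_singleton]
    ring
  | cons y r ih =>
    intro j x
    have hih := ih (j + 1) y
    simp only [pvG, pvSubRow, List.length_cons, List.getLastD_cons] at hih ⊢
    rw [Nat.choose_succ_succ m j]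
    have hc : j + 1 + r.length + 1 = j + r.length + 1 + 1 := by omega
    rw [hc] at hih
    push_cast at hih ⊢
    linear_combination hih

theorem pvG_zero (n : Nat) (row : List Int) (j : Nat)
    (h : ∀ v ∈ row, v = 0) : pvG n row j = 0 := by
  induction row generalizing j with
  | nil => simp [pvG]
  | cons v rest ih =>
    have hv : v = 0 := h v (by simp)
    have ht : ∀ w ∈ rest, w = 0 := fun w hw => h w (List.mem_cons_of_mem _ hw)
    simp [pvG, hv, ih _ ht]

-- A's per-pattern value equals the closed-form sum
theorem pvA_eq_pvG (row : List Int) :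
    (pvStack row).foldr (fun s d => s - d) 0 = pvG row.length row 0 := by
  induction hL : row.length using Nat.strong_induction_on generalizing row with
  | _ L IH =>
  subst hL
  rw [pvStack]
  by_cases h : row.any (fun v => v != 0)
  · rw [if_pos h]
    have hne : row ≠ [] := by intro hn; subst hn; simp at h
    obtain ⟨x, rest, rfl⟩ := List.exists_cons_of_ne_nil hne
    have hsub : (pvSubRow (x :: rest)).length = rest.length := by
      rw [pvSubRow_length]; simp
    have hIH := IH (pvSubRow (x :: rest)).length (by rw [hsub]; simp) _ rfl
    have hkey := part_two_key rest.length rest 0 x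
    simp only [List.foldr_cons, List.headD_cons]
    rw [hIH, hsub]
    have hz : rest.length.choose (0 + rest.length + 1) = 0 :=
      Nat.choose_eq_zero_of_lt (by omega)
    rw [hz] at hkey
    simp only [List.length_cons] at *
    push_cast [Nat.choose_zero_right, hz] at hkey
    linarith [hkey]
  · rw [if_neg h]
    have hall : ∀ v ∈ row, v = 0 := by
      intro v hv
      by_contra hvne
      exact h (List.any_eq_true.mpr ⟨v, hv, by simpa using hvne⟩)
    simp [pvG_zero _ _ _ hall]

-- B's fold invariant: sign = (-1)^j, c = C(n, j+1)
theorem pvB_inv (n : Nat) (rest : List Int) : ∀ (j : Nat) (s : Int), j + rest.length ≤ n →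
    (rest.foldl
      (fun (st : Int × Int × Int × Int) v =>
        let (s, sign, c, j) := st
        (s + sign * c * v, -sign, PySem.Int.floordiv (c * ((n : Int) - j - 1)) (j + 2), j + 1))
      (s, (-1 : Int) ^ j, (n.choose (j + 1) : Int), (j : Int))).1 = s + pvG n rest j := by
  induction rest with
  | nil => intro j s _; simp [pvG]
  | cons v r ih =>
    intro j s hj
    simp only [List.foldl_cons, List.length_cons] at hj ⊢
    have hc : PySem.Int.floordiv ((n.choose (j + 1) : Int) * ((n : Int) - (j : Int) - 1)) ((j : Int) + 2)
        = (n.choose (j + 2) : Int) := by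
      have hj1 : j + 1 ≤ n := by omega
      have hsub : (n : Int) - (j : Int) - 1 = ((n - (j + 1) : Nat) : Int) := by
        push_cast [Nat.cast_sub hj1]; ring
      have hnum : n.choose (j + 1) * (n - (j + 1)) = n.choose (j + 2) * (j + 2) := by
        simpa using (Nat.choose_succ_right_eq n (j + 1)).symm
      rw [hsub]
      rw [show ((j : Int) + 2) = ((j + 2 : Nat) : Int) by push_cast; ring]
      rw [show ((n.choose (j + 1) : Int) * ((n - (j + 1) : Nat) : Int)) = ((n.choose (j + 1) * (n - (j + 1)) : Nat) : Int) by push_cast; ring]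
      rw [PySem.Int.floordiv_natCast, hnum, Nat.mul_div_cancel _ (by omega)]
    rw [show (-(-1 : Int) ^ j) = (-1 : Int) ^ (j + 1) by ring]
    rw [hc, show ((j : Int) + 1) = ((j + 1 : Nat) : Int) by push_cast; ring]
    rw [ih (j + 1) _ (by omega)]
    simp [pvG]
    ring

-- per-pattern agreement of the two ports' inner computations
theorem pv_perpat (pattern : List Int) :
    (pvStack pattern).reverse.foldl (fun diff s => s - diff) 0
    = (pattern.foldl
        (fun (st : Int × Int × Int × Int) v =>
          let (s, sign, c, j) := st
          (s + sign * c * v, -sign,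
            PySem.Int.floordiv (c * ((pattern.length : Int) - j - 1)) (j + 2), j + 1))
        (0, 1, (pattern.length : Int), 0)).1 := by
  have hB := pvB_inv pattern.length pattern 0 0 (by omega)
  simp only [pow_zero, Nat.choose_one_right, Nat.cast_zero, zero_add] at hB
  rw [hB, List.foldl_reverse]
  exact pvA_eq_pvG pattern

-- ===== VERDICT (by name: the statement is the Claim_ definition above) =====
theorem part_two_spec : Claim_equal_part_two := by
  intro input_data _
  unfold Spec_part_two part_two part_two_alt
  congr 1
  funext total pattern
  simp only []
  rw [pv_perpat]
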